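-- pv_equiv track=rewrite | github.com/eudeniss/trading_system | presentation/display/monitor_app.py | _create_risk_bar
-- ===== SOURCE A (Python) =====
-- def _create_risk_bar(risk_level: str) -> str:
--     """Cria uma barra visual do nível de risco."""
--     levels = ['LOW', 'MEDIUM', 'HIGH', 'CRITICAL']
--     current_index = levels.index(risk_level) if risk_level in levels else 0
--
--     bar = []
--     for i in range(len(levels)):
--         bar.append('█' if i <= current_index else '░')
--         if i < len(levels) - 1:
--             bar.append(' ')
--
--     return f"[{''.join(bar)}]"
-- ===== SOURCE B (Python) =====
-- _RISK_BARS = {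
--     'LOW':      '[\u2588 \u2591 \u2591 \u2591]',
--     'MEDIUM':   '[\u2588 \u2588 \u2591 \u2591]',
--     'HIGH':     '[\u2588 \u2588 \u2588 \u2591]',
--     'CRITICAL': '[\u2588 \u2588 \u2588 \u2588]',
-- }
--
-- def _create_risk_bar(risk_level: str) -> str:
--     """Cria uma barra visual do nível de risco."""
--     return _RISK_BARS.get(risk_level, _RISK_BARS['LOW'])
-- ===== Notes on version B (the rewrite author's own statement) =====
-- stated objective: simpler
-- what changed: Replaces the per-level loop (index lookup, branch per element, conditional space insertion) with a precomputed lookup table mapping each of the four risk levels directly to its finished bar string, defaulting to the LOW bar for unknown levels.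
import Mathlib
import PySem

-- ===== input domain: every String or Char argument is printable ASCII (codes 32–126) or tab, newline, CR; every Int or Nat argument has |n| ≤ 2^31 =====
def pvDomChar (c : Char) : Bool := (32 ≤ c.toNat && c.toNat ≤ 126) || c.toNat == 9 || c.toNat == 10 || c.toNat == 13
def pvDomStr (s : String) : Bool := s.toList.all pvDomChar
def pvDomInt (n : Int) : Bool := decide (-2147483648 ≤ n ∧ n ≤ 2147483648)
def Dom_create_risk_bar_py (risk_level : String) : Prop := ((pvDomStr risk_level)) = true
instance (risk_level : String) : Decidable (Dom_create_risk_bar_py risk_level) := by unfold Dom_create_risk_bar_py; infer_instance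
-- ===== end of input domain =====

-- B replaces A's per-level loop (index lookup, per-element branch, conditional space) with a
-- precomputed table mapping each risk level directly to its finished bar string (default: LOW's bar).

-- ===== PORT A =====
def create_risk_bar_py (risk_level : String) : String :=
  let levels : List String := ["LOW", "MEDIUM", "HIGH", "CRITICAL"]
  let current_index : Int :=
    if levels.contains risk_level then ((PySem.List.index? levels risk_level).getD 0 : Nat) else 0
  let bar : List String :=
    (PySem.List.pyRange 0 (PySem.List.len levels) 1).foldl
      (fun acc i =>
        (acc ++ [if i ≤ current_index then "█" else "░"]) ++
        (if i < PySem.List.len levels - 1 then [" "] else []))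
      []
  PySem.Str.join "" (["["] ++ [PySem.Str.join "" bar] ++ ["]"])

-- ===== PORT B =====
def riskBarsTable : PySem.Dict String String :=
  PySem.Dict.ofList [("LOW", "[█ ░ ░ ░]"), ("MEDIUM", "[█ █ ░ ░]"), ("HIGH", "[█ █ █ ░]"), ("CRITICAL", "[█ █ █ █]")]

def create_risk_bar_py_alt (risk_level : String) : String :=
  PySem.Dict.getD riskBarsTable risk_level (PySem.Dict.getD riskBarsTable "LOW" "")

-- ===== PRECONDITION & SPEC =====
def Spec_create_risk_bar_py (risk_level : String) (out : String) : Prop := out = create_risk_bar_py_alt risk_level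
instance (risk_level : String) (out : String) : Decidable (Spec_create_risk_bar_py risk_level out) := by unfold Spec_create_risk_bar_py; infer_instance

-- ===== CLAIM (what is proved, stated in full; the proofs are below) =====
def Claim_equal_create_risk_bar_py : Prop := ∀ (risk_level : String), Dom_create_risk_bar_py risk_level → Spec_create_risk_bar_py risk_level (create_risk_bar_py risk_level)

-- ===== LEMMAS AND PROOFS =====
theorem create_risk_bar_eq (r : String) :
    create_risk_bar_py r = create_risk_bar_py_alt r := by
  by_cases h1 : r = "LOW"
  · subst h1; decide
  by_cases h2 : r = "MEDIUM"
  · subst h2; decide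
  by_cases h3 : r = "HIGH"
  · subst h3; decide
  by_cases h4 : r = "CRITICAL"
  · subst h4; decide
  have hc : (["LOW", "MEDIUM", "HIGH", "CRITICAL"] : List String).contains r = false := by
    simp [List.contains_eq_mem, h1, h2, h3, h4]
  have hb1 : (("LOW" : String) == r) = false := by simp [beq_eq_false_iff_ne]; exact fun h => h1 h.symm
  have hb2 : (("MEDIUM" : String) == r) = false := by simp [beq_eq_false_iff_ne]; exact fun h => h2 h.symm
  have hb3 : (("HIGH" : String) == r) = false := by simp [beq_eq_false_iff_ne]; exact fun h => h3 h.symm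
  have hb4 : (("CRITICAL" : String) == r) = false := by simp [beq_eq_false_iff_ne]; exact fun h => h4 h.symm
  have ht : riskBarsTable = PySem.Dict.mk
      [("LOW", "[█ ░ ░ ░]"), ("MEDIUM", "[█ █ ░ ░]"), ("HIGH", "[█ █ █ ░]"), ("CRITICAL", "[█ █ █ █]")] := by
    decide
  simp only [create_risk_bar_py, create_risk_bar_py_alt, hc, Bool.false_eq_true, if_false, ht,
    PySem.Dict.getD, PySem.Dict.get?_mk_cons, hb1, hb2, hb3, hb4, PySem.Dict.get?, List.find?]
  decide

-- ===== VERDICT (by name: the statement is the Claim_ definition above) =====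
theorem create_risk_bar_py_spec : Claim_equal_create_risk_bar_py := by
  intro r _
  exact create_risk_bar_eq r
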